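-- pv_equiv track=rewrite | github.com/Lawen-s/Coding_Test | test.py | is_similar_email
-- ===== SOURCE A (Python) =====
-- def is_similar_email(email1, email2):
--     account1, server1 = email1.split('@')
--     account2, server2 = email2.split('@')
--
--     # 계정이름이 완전히 같으면 서버와 관계없이 유사
--     if account1 == account2:
--         return True
--
--     # 서버가 다르면 계정이름이 완전히 같아야만 유사
--     if server1 != server2:
--         return False
--
--     # 한 문자를 제거해서 같아지는지 확인
--     if len(account1) == len(account2) + 1:
--         for i in range(len(account1)):
--             if account1[:i] + account1[i+1:] == account2:
--                 return True
--     elif len(account2) == len(account1) + 1: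
--         for i in range(len(account2)):
--             if account2[:i] + account2[i+1:] == account1:
--                 return True
--
--     # 특정 문자를 모두 제거했을 때 같아지는지 확인
--     for char in set(account1 + account2):
--         if account1.replace(char, '') == account2.replace(char, ''):
--             return True
--
--     return False
-- ===== SOURCE B (Python) =====
-- def _skip_one(longer, shorter):
--     # single forward scan: first mismatch index, then one-char skip
--     i = 0
--     while i < len(shorter) and longer[i] == shorter[i]:
--         i += 1
--     return longer[i+1:] == shorter[i:]
--
-- def _without(s, c):
--     return ''.join(ch for ch in s if ch != c)
--
-- def is_similar_email(email1, email2):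
--     account1, server1 = email1.split('@')
--     account2, server2 = email2.split('@')
--     if account1 == account2:
--         return True
--     if server1 != server2:
--         return False
--     if len(account1) == len(account2) + 1 and _skip_one(account1, account2):
--         return True
--     if len(account2) == len(account1) + 1 and _skip_one(account2, account1):
--         return True
--     return any(_without(account1, c) == _without(account2, c)
--                for c in dict.fromkeys(account1 + account2))
-- ===== Notes on version B (the rewrite author's own statement) =====
-- stated objective: alternative
-- what changed: The quadratic slice-and-compare deletion loop is replaced by a single O(n) forward scan to the first mismatch followed by one suffix comparison, and the per-character .replace test iterates dict.fromkeys of the concatenation with a filter comprehension instead of building a set and calling str.replace.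
import Mathlib
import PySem

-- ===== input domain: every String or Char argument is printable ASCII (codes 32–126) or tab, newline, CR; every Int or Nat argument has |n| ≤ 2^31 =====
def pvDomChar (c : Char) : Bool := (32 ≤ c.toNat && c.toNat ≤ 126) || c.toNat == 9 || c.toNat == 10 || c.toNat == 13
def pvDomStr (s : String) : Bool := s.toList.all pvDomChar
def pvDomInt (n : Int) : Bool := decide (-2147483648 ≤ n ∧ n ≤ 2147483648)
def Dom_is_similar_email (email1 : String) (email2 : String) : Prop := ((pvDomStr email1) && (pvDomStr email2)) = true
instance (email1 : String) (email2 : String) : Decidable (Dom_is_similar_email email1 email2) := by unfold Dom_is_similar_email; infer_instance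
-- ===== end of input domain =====

-- B replaces A's quadratic slice-based one-deletion loop by a single forward scan and
-- tests char removal with a filter over dict.fromkeys instead of str.replace over a set (alternative decomposition).


-- ===== PORT A =====
-- A: split at '@'; equal accounts -> True; different servers -> False; else the
-- quadratic "delete one char via slices" loop, then the per-distinct-char replace loop.
def pvDelLoopA (L S : List Char) : Bool :=
  (PySem.List.pyRange 0 (L.length : Int) 1).any (fun i =>
    PySem.List.slice L none (some i) ++ PySem.List.slice L (some (i + 1)) none == S)

def pvBodyA (a1 s1 a2 s2 : List Char) : Bool :=
  if a1 == a2 then true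
  else if s1 != s2 then false
  else if (if a1.length == a2.length + 1 then pvDelLoopA a1 a2
           else if a2.length == a1.length + 1 then pvDelLoopA a2 a1
           else false) then true
  else (PySem.Set.ofList (a1 ++ a2)).any (fun c =>
    PySem.Chars.replace a1 [c] [] == PySem.Chars.replace a2 [c] [])

def is_similar_email (email1 : String) (email2 : String) : Bool :=
  match PySem.Chars.splitOn email1.toList ['@'], PySem.Chars.splitOn email2.toList ['@'] with
  | [a1, s1], [a2, s2] => pvBodyA a1 s1 a2 s2
  | _, _ => false  -- unpacking raises ValueError in Python; excluded by Pre_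

-- ===== PORT B =====
-- B: same split and shortcuts, but the one-deletion check is a single forward scan
-- (skip one char of the longer string at the first mismatch) and the char-removal
-- test filters the character out, iterating dict.fromkeys of the concatenation.
def pvSkipOne : List Char → List Char → Bool
  | l, [] => l.drop 1 == ([] : List Char)
  | [], _ :: _ => false  -- unreachable under the length guard
  | a :: l, b :: s => if a == b then pvSkipOne l s else l == b :: s

def pvWithout (s : List Char) (c : Char) : List Char := s.filter (fun ch => ch != c)

def pvBodyB (a1 s1 a2 s2 : List Char) : Bool :=
  if a1 == a2 then true
  else if s1 != s2 then false
  else if a1.length == a2.length + 1 && pvSkipOne a1 a2 then true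
  else if a2.length == a1.length + 1 && pvSkipOne a2 a1 then true
  else (PySem.List.dedup (a1 ++ a2)).any (fun c => pvWithout a1 c == pvWithout a2 c)

def is_similar_email_alt (email1 : String) (email2 : String) : Bool :=
  let p1 := PySem.Chars.splitOn email1.toList ['@']
  let p2 := PySem.Chars.splitOn email2.toList ['@']
  if p1.length == 2 && p2.length == 2 then
    pvBodyB (p1.getD 0 []) (p1.getD 1 []) (p2.getD 0 []) (p2.getD 1 [])
  else false  -- unpacking raises ValueError in Python; excluded by Pre_

-- ===== PRECONDITION & SPEC =====
-- Pre_ excludes exactly the emails on which A's two-variable unpacking of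
-- email.split('@') raises ValueError (the split does not yield exactly two parts).
def Pre_is_similar_email (email1 : String) (email2 : String) : Prop :=
  (PySem.Chars.splitOn email1.toList ['@']).length = 2 ∧
  (PySem.Chars.splitOn email2.toList ['@']).length = 2
instance (email1 : String) (email2 : String) : Decidable (Pre_is_similar_email email1 email2) := by unfold Pre_is_similar_email; infer_instance

def pvWitness_is_similar_email : String × String := ("abc@x.com", "ac@x.com")

def Spec_is_similar_email (email1 : String) (email2 : String) (out : Bool) : Prop := out = is_similar_email_alt email1 email2
instance (email1 : String) (email2 : String) (out : Bool) : Decidable (Spec_is_similar_email email1 email2 out) := by unfold Spec_is_similar_email; infer_instance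

-- ===== CLAIM (what is proved, stated in full; the proofs are below) =====
def Claim_equal_is_similar_email : Prop := ∀ (email1 : String) (email2 : String), Dom_is_similar_email email1 email2 → Pre_is_similar_email email1 email2 → Spec_is_similar_email email1 email2 (is_similar_email email1 email2)

-- ===== LEMMAS AND PROOFS =====

-- the slice loop tests exactly "some one-position deletion of L equals S"
theorem pvDelLoopA_iff (L S : List Char) :
    pvDelLoopA L S = true ↔ ∃ k, k < L.length ∧ L.take k ++ L.drop (k + 1) = S := by
  unfold pvDelLoopA
  rw [List.any_eq_true]
  constructor
  · rintro ⟨i, hi, hp⟩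
    rw [PySem.List.mem_pyRange_one] at hi
    refine ⟨i.toNat, by omega, ?_⟩
    rw [PySem.List.slice_to L hi.1, PySem.List.slice_from L (by omega : (0:Int) ≤ i + 1)] at hp
    have : (i + 1).toNat = i.toNat + 1 := by omega
    rw [this] at hp
    exact by simpa using hp
  · rintro ⟨k, hk, hp⟩
    refine ⟨(k : Int), by rw [PySem.List.mem_pyRange_one]; omega, ?_⟩
    rw [PySem.List.slice_to L (by omega : (0:Int) ≤ (k:Int)),
        PySem.List.slice_from L (by omega : (0:Int) ≤ (k:Int) + 1)]
    have h1 : ((k : Int)).toNat = k := by omega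
    have h2 : ((k : Int) + 1).toNat = k + 1 := by omega
    rw [h1, h2]
    exact by simpa using hp

-- the forward scan tests the same predicate, given the length hypothesis
theorem pvSkipOne_iff (S : List Char) : ∀ L : List Char, L.length = S.length + 1 →
    (pvSkipOne L S = true ↔ ∃ k, k < L.length ∧ L.take k ++ L.drop (k + 1) = S) := by
  induction S with
  | nil =>
    intro L hL
    match L, hL with
    | [a], _ =>
      simp [pvSkipOne]
  | cons b s ih =>
    intro L hL
    match L, hL with
    | a :: l, hL =>
      have hl : l.length = s.length + 1 := by simpa using hL
      by_cases hab : a = b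
      · subst hab
        have hstep : pvSkipOne (a :: l) (a :: s) = pvSkipOne l s := by simp [pvSkipOne]
        rw [hstep, ih l hl]
        constructor
        · rintro ⟨k, hk, hp⟩
          exact ⟨k + 1, by simp only [List.length_cons]; omega, by simp [List.take_succ_cons, hp]⟩
        · rintro ⟨k, hk, hp⟩
          match k, hp with
          | 0, hp =>
            simp only [List.take_zero, List.nil_append, List.drop_succ_cons, List.drop_zero] at hp
            subst hp
            exact ⟨0, by simp, by simp⟩
          | k + 1, hp =>
            simp only [List.take_succ_cons, List.drop_succ_cons, List.cons_append, List.cons.injEq] at hp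
            exact ⟨k, by simp only [List.length_cons] at hk; omega, hp.2⟩
      · have hstep : pvSkipOne (a :: l) (b :: s) = (l == b :: s) := by simp [pvSkipOne, hab]
        rw [hstep]
        constructor
        · intro h
          exact ⟨0, by simp, by simpa using h⟩
        · rintro ⟨k, hk, hp⟩
          match k, hp with
          | 0, hp => simpa using hp
          | k + 1, hp =>
            simp only [List.take_succ_cons, List.cons_append, List.cons.injEq] at hp
            exact absurd hp.1 hab

theorem delLoop_eq_skipOne (L S : List Char) (h : L.length = S.length + 1) :
    pvDelLoopA L S = pvSkipOne L S := by
  rw [Bool.eq_iff_iff, pvDelLoopA_iff, pvSkipOne_iff S L h]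

-- str.replace(c, '') with a one-character pattern is a filter
theorem replace_go_singleton (c : Char) : ∀ fuel (l acc : List Char), l.length ≤ fuel →
    PySem.Chars.replace.go [c] [] fuel l acc = acc.reverse ++ l.filter (fun ch => ch != c) := by
  intro fuel
  induction fuel with
  | zero =>
    intro l acc h
    match l, h with
    | [], _ => simp [PySem.Chars.replace.go]
  | succ n ih =>
    intro l acc h
    match l with
    | [] => simp [PySem.Chars.replace.go]
    | ch :: t =>
      simp only [PySem.Chars.replace.go]
      by_cases hc : c = ch
      · subst hc
        rw [if_pos (by simp [List.isPrefixOf])]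
        have hd : List.drop [c].length (c :: t) = t := by simp
        simp only [List.reverse_nil, List.nil_append]
        rw [hd, ih t acc (by simpa using h)]
        simp
      · rw [if_neg (by simp [List.isPrefixOf, hc])]
        rw [ih t (ch :: acc) (by simpa using h)]
        simp [Ne.symm hc]

theorem replace_eq_without (s : List Char) (c : Char) :
    PySem.Chars.replace s [c] [] = pvWithout s c := by
  unfold PySem.Chars.replace pvWithout
  rw [if_neg (by simp)]
  rw [replace_go_singleton c s.length s [] (le_refl _)]
  simp

-- iterating set(xs) and dict.fromkeys(xs) give the same any
theorem any_ofList_eq_any_dedup (xs : List Char) (p : Char → Bool) :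
    (PySem.Set.ofList xs).any p = (PySem.List.dedup xs).any p := by
  rw [PySem.List.dedup_eq_ofList]

theorem body_eq (a1 s1 a2 s2 : List Char) : pvBodyA a1 s1 a2 s2 = pvBodyB a1 s1 a2 s2 := by
  unfold pvBodyA pvBodyB
  have hrep : (PySem.Set.ofList (a1 ++ a2)).any (fun c =>
      PySem.Chars.replace a1 [c] [] == PySem.Chars.replace a2 [c] []) =
      (PySem.List.dedup (a1 ++ a2)).any (fun c => pvWithout a1 c == pvWithout a2 c) := by
    rw [any_ofList_eq_any_dedup]
    exact PySem.List.any_congr_mem (fun x _ => by rw [replace_eq_without, replace_eq_without])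
  by_cases h12 : a1 = a2
  · simp [h12]
  · by_cases hs : s1 = s2
    · by_cases hl1 : a1.length = a2.length + 1
      · rw [delLoop_eq_skipOne a1 a2 hl1]
        have hl2 : ¬ a2.length = a1.length + 1 := by omega
        cases hp : pvSkipOne a1 a2 <;>
          simp [h12, hs, hl1, hrep,
            (show ¬ a2.length = a2.length + 1 + 1 by omega)]
      · by_cases hl2 : a2.length = a1.length + 1
        · rw [delLoop_eq_skipOne a2 a1 hl2]
          cases hp : pvSkipOne a2 a1 <;>
            simp [h12, hs, hl2, hrep,
              (show ¬ a1.length = a1.length + 1 + 1 by omega)]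
        · simp [h12, hs, hl1, hl2, hrep]
    · simp [h12, hs]

-- ===== VERDICT (by name: the statement is the Claim_ definition above) =====
theorem split_two {l : List (List Char)} (h : l.length = 2) : ∃ a s, l = [a, s] :=
  match l, h with | [a, s], _ => ⟨a, s, rfl⟩

theorem is_similar_email_spec : Claim_equal_is_similar_email := by
  intro email1 email2 _ hpre
  unfold Spec_is_similar_email
  unfold is_similar_email is_similar_email_alt
  obtain ⟨h1, h2⟩ := hpre
  obtain ⟨a1, s1, e1⟩ := split_two h1
  obtain ⟨a2, s2, e2⟩ := split_two h2
  rw [e1, e2]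
  show pvBodyA a1 s1 a2 s2 = _
  simp only [List.length_cons, List.length_nil, List.getD]
  rw [if_pos (by simp)]
  exact body_eq a1 s1 a2 s2
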